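-- pv_equiv track=rewrite | github.com/giff-h/green-eggs | green_eggs/data_types.py | _irc_v3_unescape_iter
-- ===== SOURCE A (Python) =====
-- from typing import Any, Callable, ClassVar, Dict, Generator, List, Optional, Pattern, Tuple, Type
--
-- _unescape_lookup: Dict[str, str] = {
--     '\\': '\\',
--     ':': ';',
--     's': ' ',
--     'r': '\r',
--     'n': '\n',
-- }
--
-- def _irc_v3_unescape_iter(raw: str) -> Generator[str, None, None]:
--     str_iter = iter(raw)
--     for c in str_iter:
--         if c == '\\':
--             try:
--                 c = next(str_iter)
--             except StopIteration:
--                 yield c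
--                 break
--             else:
--                 yield _unescape_lookup.get(c, f'\\{c}')
--         else:
--             yield c
-- ===== SOURCE B (Python) =====
-- _unescape_lookup = {
--     '\\': '\\',
--     ':': ';',
--     's': ' ',
--     'r': '\r',
--     'n': '\n',
-- }
--
--
-- def _irc_v3_unescape_iter(raw):
--     # Split once on the backslash; the text between separators is plain,
--     # and each separator starts an escape pair (or is a trailing lone backslash).
--     segs = raw.split('\\')
--     yield from segs[0]
--     i, n = 1, len(segs)
--     while i < n:
--         seg = segs[i]
--         if seg:
--             # separator followed by a non-backslash char: escape pair
--             yield _unescape_lookup.get(seg[0], '\\' + seg[0])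
--             yield from seg[1:]
--             i += 1
--         elif i == n - 1:
--             # trailing lone backslash
--             yield '\\'
--             i += 1
--         else:
--             # two consecutive backslashes: the pair '\\' + '\\'
--             yield '\\'
--             yield from segs[i + 1]
--             i += 2
-- ===== Notes on version B (the rewrite author's own statement) =====
-- stated objective: alternative
-- what changed: Replaces A's char-by-char iterator walk (pulling an extra char from the iterator after each escape character) with a single str.split on the escape character followed by a scan over the resulting segments, each separator boundary marking an escape pair.
import Mathlib
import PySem

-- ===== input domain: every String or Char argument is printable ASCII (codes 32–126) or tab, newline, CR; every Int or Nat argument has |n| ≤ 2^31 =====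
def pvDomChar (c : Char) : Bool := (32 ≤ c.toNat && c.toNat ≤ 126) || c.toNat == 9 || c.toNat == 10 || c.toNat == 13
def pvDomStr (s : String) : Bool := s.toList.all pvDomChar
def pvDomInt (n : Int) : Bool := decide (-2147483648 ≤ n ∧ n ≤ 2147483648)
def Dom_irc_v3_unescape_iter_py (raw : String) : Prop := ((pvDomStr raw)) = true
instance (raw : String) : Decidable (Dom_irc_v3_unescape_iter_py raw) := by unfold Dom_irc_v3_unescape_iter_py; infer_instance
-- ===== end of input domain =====

-- B replaces A's one-character-at-a-time iterator walk by a single split on '\\'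
-- followed by a scan over the resulting segments (objective: alternative decomposition).

-- ===== PORT A =====
-- the module-level dict _unescape_lookup (shared context of both programs)
def ircUnescapeLookup : PySem.Dict String String :=
  PySem.Dict.ofList [("\\", "\\"), (":", ";"), ("s", " "), ("r", "\r"), ("n", "\n")]

def ircSingle (c : Char) : String := String.ofList [c]

-- A's generator loop: for c in str_iter, pulling one extra char after a backslash
def ircAGo : List Char → List String
  | [] => []
  | c :: rest =>
    if c = '\\' then
      match rest with
      | [] => [ircSingle c]                                  -- StopIteration: yield c; break
      | d :: rest' =>
        ircUnescapeLookup.getD (ircSingle d) ("\\" ++ ircSingle d) :: ircAGo rest'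
    else
      ircSingle c :: ircAGo rest

def irc_v3_unescape_iter_py (raw : String) : List String := ircAGo raw.toList

-- ===== PORT B =====
-- yield from seg : each character as a 1-char string
def ircPlain (s : List Char) : List String := s.map ircSingle

-- B's while-loop over segs[1:] (index i; consumes one segment, or two after '\\\\')
def ircBEsc : List (List Char) → List String
  | [] => []
  | seg :: rest =>
    match seg with
    | d :: tl =>                                              -- seg non-empty: escape pair '\' + d
      ircUnescapeLookup.getD (ircSingle d) ("\\" ++ ircSingle d) :: (ircPlain tl ++ ircBEsc rest)
    | [] =>
      match rest with
      | [] => ["\\"]                                          -- trailing lone backslash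
      | nxt :: rest' => "\\" :: (ircPlain nxt ++ ircBEsc rest')  -- '\\'+'\\' pair, next seg plain

-- raw.split('\\') ported as Mathlib's List.splitOn (single-char separator, keeps empties)
def irc_v3_unescape_iter_py_alt (raw : String) : List String :=
  match List.splitOn '\\' raw.toList with
  | [] => []                                                  -- unreachable: split is never empty
  | s0 :: rest => ircPlain s0 ++ ircBEsc rest

-- ===== PRECONDITION & SPEC =====
def Spec_irc_v3_unescape_iter_py (raw : String) (out : List String) : Prop := out = irc_v3_unescape_iter_py_alt raw
instance (raw : String) (out : List String) : Decidable (Spec_irc_v3_unescape_iter_py raw out) := by unfold Spec_irc_v3_unescape_iter_py; infer_instance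

-- ===== CLAIM (what is proved, stated in full; the proofs are below) =====
def Claim_equal_irc_v3_unescape_iter_py : Prop := ∀ (raw : String), Dom_irc_v3_unescape_iter_py raw → Spec_irc_v3_unescape_iter_py raw (irc_v3_unescape_iter_py raw)

-- ===== LEMMAS AND PROOFS =====

-- segment view of B applied to any split result
def ircBSegs : List (List Char) → List String
  | [] => []
  | s0 :: rest => ircPlain s0 ++ ircBEsc rest

lemma ircAlt_eq (raw : String) :
    irc_v3_unescape_iter_py_alt raw = ircBSegs (List.splitOn '\\' raw.toList) := by
  unfold irc_v3_unescape_iter_py_alt ircBSegs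
  cases List.splitOn '\\' raw.toList <;> rfl

lemma splitOn_cons (c : Char) (t : List Char) :
    List.splitOn '\\' (c :: t) =
      if c = '\\' then [] :: List.splitOn '\\' t
      else List.modifyHead (List.cons c) (List.splitOn '\\' t) := by
  simp only [List.splitOn, List.splitOnP_cons, beq_iff_eq]

lemma splitOn_ne_nil (t : List Char) : List.splitOn '\\' t ≠ [] := by
  simp only [List.splitOn]; exact List.splitOnP_ne_nil _ _

lemma lookup_bs : ircUnescapeLookup.getD (ircSingle '\\') ("\\" ++ ircSingle '\\') = "\\" := by
  decide

lemma ircAGo_bs_cons (d : Char) (rest : List Char) :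
    ircAGo ('\\' :: d :: rest) =
      ircUnescapeLookup.getD (ircSingle d) ("\\" ++ ircSingle d) :: ircAGo rest := rfl

lemma ircAGo_cons (c : Char) (rest : List Char) (hc : c ≠ '\\') :
    ircAGo (c :: rest) = ircSingle c :: ircAGo rest := by
  rw [ircAGo.eq_def]
  simp [hc]

lemma ircAGo_eq_segs : ∀ (l : List Char), ircAGo l = ircBSegs (List.splitOn '\\' l) := by
  intro l
  induction l using ircAGo.induct with
  | case1 => rfl
  | case2 => rfl
  | case3 d rest' ih =>
    rw [splitOn_cons, if_pos rfl]
    by_cases hd : d = '\\'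
    · subst hd
      rw [splitOn_cons, if_pos rfl]
      obtain ⟨s0, r', h⟩ : ∃ s0 r', List.splitOn '\\' rest' = s0 :: r' := by
        cases h : List.splitOn '\\' rest' with
        | nil => exact absurd h (splitOn_ne_nil rest')
        | cons a b => exact ⟨a, b, rfl⟩
      rw [h, ircAGo_bs_cons, lookup_bs, ih, h]
      simp [ircBSegs, ircBEsc, ircPlain]
    · rw [splitOn_cons, if_neg hd]
      obtain ⟨s0, r', h⟩ : ∃ s0 r', List.splitOn '\\' rest' = s0 :: r' := by
        cases h : List.splitOn '\\' rest' with
        | nil => exact absurd h (splitOn_ne_nil rest')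
        | cons a b => exact ⟨a, b, rfl⟩
      rw [h, ircAGo_bs_cons, ih, h]
      simp [ircBSegs, ircBEsc, ircPlain]
  | case4 c rest hc ih =>
    rw [splitOn_cons, if_neg hc]
    obtain ⟨s0, rest2, h⟩ : ∃ s0 rest2, List.splitOn '\\' rest = s0 :: rest2 := by
      cases h : List.splitOn '\\' rest with
      | nil => exact absurd h (splitOn_ne_nil rest)
      | cons a b => exact ⟨a, b, rfl⟩
    rw [h, ircAGo_cons c rest hc, ih, h]
    simp [ircBSegs, ircPlain]

-- ===== VERDICT (by name: the statement is the Claim_ definition above) =====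
theorem irc_v3_unescape_iter_py_spec : Claim_equal_irc_v3_unescape_iter_py := by
  intro raw _
  unfold Spec_irc_v3_unescape_iter_py irc_v3_unescape_iter_py
  rw [ircAlt_eq, ircAGo_eq_segs]
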